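-- pv_equiv track=rewrite | github.com/JulianVentura/dotfiles | .gitfilters/clean.py | delete_starts_with
-- ===== SOURCE A (Python) =====
-- def delete_starts_with(content: list[str], phrases: list[str]) -> list[str]:
--     out = []
--
--     for line in content:
--         found = False
--         for phrase in phrases:
--             if phrase in line:
--                 found = True
--                 break
--         if found:
--             continue
--         out.append(line)
--
--     return out
-- ===== SOURCE B (Python) =====
-- def delete_starts_with(content: list[str], phrases: list[str]) -> list[str]:
--     # Index the phrases once by their first character; then scan each line's
--     # offsets, probing only the phrases whose first character matches there.
--     buckets = {}
--     for p in phrases: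
--         buckets.setdefault(p[:1], []).append(p)
--     drop_all = "" in buckets  # an empty phrase is a substring of every line
--     out = []
--     for line in content:
--         if drop_all:
--             continue
--         keep = True
--         for i, ch in enumerate(line):
--             for p in buckets.get(ch, ()):
--                 if line.startswith(p, i):
--                     keep = False
--                     break
--             if not keep:
--                 break
--         if keep:
--             out.append(line)
--     return out
-- ===== Notes on version B (the rewrite author's own statement) =====
-- stated objective: alternative
-- what changed: B builds a dict bucketing the phrases by first character once, then scans each line's positions probing only the phrases whose first character occurs there (with an upfront empty-phrase check), instead of A's full substring search of the line for every phrase.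
import Mathlib
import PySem

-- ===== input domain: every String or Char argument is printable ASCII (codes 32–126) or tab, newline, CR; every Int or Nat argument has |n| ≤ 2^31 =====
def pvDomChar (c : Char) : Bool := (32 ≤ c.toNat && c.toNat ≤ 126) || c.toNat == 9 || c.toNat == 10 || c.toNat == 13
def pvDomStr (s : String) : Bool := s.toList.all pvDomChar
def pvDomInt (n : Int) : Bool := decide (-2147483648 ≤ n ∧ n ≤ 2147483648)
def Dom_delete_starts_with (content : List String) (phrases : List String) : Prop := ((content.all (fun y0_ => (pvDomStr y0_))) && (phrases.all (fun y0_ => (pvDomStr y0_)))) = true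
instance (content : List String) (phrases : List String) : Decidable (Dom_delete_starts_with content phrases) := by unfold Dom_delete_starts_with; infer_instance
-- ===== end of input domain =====

-- B is an alternative exact algorithm: it buckets the phrases by first character once, then scans each
-- line's offsets probing only the phrases whose first character occurs there (return value only; no mutation).

-- ===== PORT A =====
-- inner 'for phrase in phrases: if phrase in line: found = True; break'
def dswFound (line : String) : List String → Bool
  | [] => false
  | p :: ps => if PySem.Str.isIn p line then true else dswFound line ps

def delete_starts_with (content : List String) (phrases : List String) : List String :=
  content.foldl (fun out line => if dswFound line phrases then out else out ++ [line]) []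

-- ===== PORT B =====
-- 'buckets.setdefault(p[:1], []).append(p)' over all phrases (dict grouped by first character)
def dswBuckets (phrases : List String) : PySem.Dict String (List String) :=
  phrases.foldl
    (fun d p => d.modify (PySem.Str.slice p (some 0) (some 1)) [] (· ++ [p]))
    PySem.Dict.empty

-- 'for p in buckets.get(ch, ()): if line.startswith(p, i): keep = False; break'
-- line.startswith(p, i) with 0 ≤ i is exactly: p.toList is a prefix of line.toList.drop i
def dswMatchAt (cs : List Char) (i : Nat) : List String → Bool
  | [] => false
  | p :: ps => if PySem.Chars.startswith (cs.drop i) p.toList then true else dswMatchAt cs i ps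

-- 'for i, ch in enumerate(line): … if not keep: break'  (returns the final 'keep')
def dswLineScan (cs : List Char) (b : PySem.Dict String (List String)) : List (Int × Char) → Bool
  | [] => true
  | (i, ch) :: rest =>
      if dswMatchAt cs i.toNat (b.getD (String.singleton ch) []) then false
      else dswLineScan cs b rest

def delete_starts_with_alt (content : List String) (phrases : List String) : List String :=
  let buckets := dswBuckets phrases
  let dropAll := buckets.contains ""      -- drop_all = "" in buckets
  content.foldl
    (fun out line =>
      if dropAll then out
      else if dswLineScan line.toList buckets (PySem.List.enumerate line.toList) then out ++ [line]
      else out)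
    []

-- ===== PRECONDITION & SPEC =====
def Spec_delete_starts_with (content : List String) (phrases : List String) (out : List String) : Prop := out = delete_starts_with_alt content phrases
instance (content : List String) (phrases : List String) (out : List String) : Decidable (Spec_delete_starts_with content phrases out) := by unfold Spec_delete_starts_with; infer_instance

-- ===== CLAIM (what is proved, stated in full; the proofs are below) =====
def Claim_equal_delete_starts_with : Prop := ∀ (content : List String) (phrases : List String), Dom_delete_starts_with content phrases → Spec_delete_starts_with content phrases (delete_starts_with content phrases)

-- ===== LEMMAS AND PROOFS =====

theorem dswFound_iff (line : String) (ps : List String) :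
    dswFound line ps = true ↔ ∃ p ∈ ps, p.toList <:+: line.toList := by
  induction ps with
  | nil => simp [dswFound]
  | cons p ps ih =>
    simp only [dswFound]
    split_ifs with h
    · simp only [true_iff]
      exact ⟨p, List.mem_cons_self, (PySem.Str.isIn_iff_infix _ _).1 h⟩
    · rw [ih]
      constructor
      · rintro ⟨q, hq, h2⟩; exact ⟨q, List.mem_cons_of_mem _ hq, h2⟩
      · rintro ⟨q, hq, h2⟩
        rcases List.mem_cons.1 hq with rfl | hq
        · exact absurd ((PySem.Str.isIn_iff_infix _ _).2 h2) h
        · exact ⟨q, hq, h2⟩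

theorem dswMatchAt_iff (cs : List Char) (i : Nat) (ps : List String) :
    dswMatchAt cs i ps = true ↔ ∃ p ∈ ps, p.toList <+: cs.drop i := by
  induction ps with
  | nil => simp [dswMatchAt]
  | cons p ps ih =>
    simp only [dswMatchAt]
    split_ifs with h
    · simp only [true_iff]
      exact ⟨p, List.mem_cons_self, (PySem.Chars.startswith_iff _ _).1 h⟩
    · rw [ih]
      constructor
      · rintro ⟨q, hq, h2⟩; exact ⟨q, List.mem_cons_of_mem _ hq, h2⟩
      · rintro ⟨q, hq, h2⟩
        rcases List.mem_cons.1 hq with rfl | hq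
        · exact absurd ((PySem.Chars.startswith_iff _ _).2 h2) h
        · exact ⟨q, hq, h2⟩

-- p[:1] on the character level is 'take 1'
theorem dswKey_toList (p : String) :
    (PySem.Str.slice p (some 0) (some 1)).toList = p.toList.take 1 := by
  simp [PySem.Str.slice, PySem.Chars.slice_eq_listSlice, PySem.List.slice_to]

-- what each bucket holds: exactly the phrases whose p[:1] equals the key
theorem dswBuckets_getD (ps : List String) (k : String) :
    (dswBuckets ps).getD k [] =
      ps.filter (fun p => PySem.Str.slice p (some 0) (some 1) == k) := by
  unfold dswBuckets
  have h : ps.foldl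
      (fun d p => d.modify (PySem.Str.slice p (some 0) (some 1)) [] (· ++ [p]))
      PySem.Dict.empty
      = (ps.map (fun p => (PySem.Str.slice p (some 0) (some 1), p))).foldl
          (fun d q => d.modify q.1 [] (· ++ [q.2])) PySem.Dict.empty := by
    rw [List.foldl_map]
  rw [h, PySem.Dict.getD_foldl_modify_append]
  simp [List.filter_map, Function.comp_def, List.map_map]

-- '"" in buckets' is exactly '"" in phrases'
theorem dswBuckets_contains_nil_iff (ps : List String) :
    (dswBuckets ps).contains "" = true ↔ "" ∈ ps := by
  rw [PySem.Dict.contains_iff_mem_keys]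
  unfold dswBuckets
  rw [PySem.Dict.keys_foldl_modify_key]
  have h : PySem.Set.update
        (PySem.Dict.keys (PySem.Dict.empty : PySem.Dict String (List String)))
        (ps.map (fun p => PySem.Str.slice p (some 0) (some 1)))
      = PySem.Set.ofList (ps.map (fun p => PySem.Str.slice p (some 0) (some 1))) := by
    simp [PySem.Set.update, PySem.Set.ofList, PySem.Dict.keys_empty]
  rw [h, PySem.Set.mem_ofList, List.mem_map]
  constructor
  · rintro ⟨p, hp, hk⟩
    have h2 : p.toList.take 1 = [] := by
      have h3 := dswKey_toList p
      rw [hk] at h3; simpa using h3.symm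
    have h4 : p.toList = [] := by
      cases hp2 : p.toList with
      | nil => rfl
      | cons a t => rw [hp2] at h2; simp at h2
    have h5 : p = "" := String.toList_inj.mp (by simp [h4])
    exact h5 ▸ hp
  · intro hp
    refine ⟨"", hp, ?_⟩
    exact String.toList_inj.mp (by simpa using dswKey_toList "")

theorem mem_enumerate_iff (cs : List Char) (i : Int) (c : Char) :
    (i, c) ∈ PySem.List.enumerate cs ↔ ∃ j : Nat, i = (j : Int) ∧ cs[j]? = some c := by
  rw [PySem.List.enumerate_eq_zipIdx_map]
  simp only [List.mem_map, Prod.ext_iff]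
  constructor
  · rintro ⟨⟨a, n⟩, hmem, h1, h2⟩
    refine ⟨n, by simpa using h1.symm, ?_⟩
    rw [← h2]; exact List.mem_zipIdx_iff_getElem?.mp hmem
  · rintro ⟨j, rfl, hc⟩
    exact ⟨(c, j), List.mem_zipIdx_iff_getElem?.mpr hc, by simp, rfl⟩

theorem dswLineScan_eq_false_iff (cs : List Char) (b : PySem.Dict String (List String))
    (l : List (Int × Char)) :
    dswLineScan cs b l = false ↔
      ∃ q ∈ l, dswMatchAt cs q.1.toNat (b.getD (String.singleton q.2) []) = true := by
  induction l with
  | nil => simp [dswLineScan]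
  | cons q l ih =>
    obtain ⟨i, ch⟩ := q
    simp only [dswLineScan]
    split_ifs with h
    · simp only [true_iff]
      exact ⟨(i, ch), List.mem_cons_self, h⟩
    · rw [ih]
      constructor
      · rintro ⟨r, hr, h2⟩; exact ⟨r, List.mem_cons_of_mem _ hr, h2⟩
      · rintro ⟨r, hr, h2⟩
        rcases List.mem_cons.1 hr with rfl | hr
        · exact absurd h2 (by simp [h])
        · exact ⟨r, hr, h2⟩

-- per-line agreement when no phrase is empty: A's 'found' is the negation of B's 'keep'
theorem dswFound_eq_not_lineScan (line : String) (ps : List String) (hε : "" ∉ ps) :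
    dswFound line ps =
      !dswLineScan line.toList (dswBuckets ps) (PySem.List.enumerate line.toList) := by
  rcases hb : dswLineScan line.toList (dswBuckets ps) (PySem.List.enumerate line.toList)
    with _ | _
  · -- the scan hit a bucket phrase: it is a prefix at some offset, hence an infix
    rw [dswLineScan_eq_false_iff] at hb
    obtain ⟨⟨i, ch⟩, _, hm⟩ := hb
    obtain ⟨p, hp, hpre⟩ := (dswMatchAt_iff _ _ _).1 hm
    rw [dswBuckets_getD] at hp
    have hp' : p ∈ ps := List.mem_of_mem_filter hp
    simp only [Bool.not_false]
    exact (dswFound_iff _ _).2 ⟨p, hp',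
      (PySem.Chars.isIn_iff_infix _ _).1
        ((PySem.Chars.exists_prefix_drop_iff_isIn _ _).1 ⟨i.toNat, hpre⟩)⟩
  · -- the scan hit nothing: no phrase occurs in the line
    simp only [Bool.not_true]
    rcases hf : dswFound line ps with _ | _
    · rfl
    · exfalso
      obtain ⟨p, hp, hinf⟩ := (dswFound_iff _ _).1 hf
      obtain ⟨j, hj⟩ := (PySem.Chars.exists_prefix_drop_iff_isIn p.toList line.toList).2
        ((PySem.Chars.isIn_iff_infix _ _).2 hinf)
      -- p is nonempty, so the occurrence is at a real position j < length
      have hpnil : p.toList ≠ [] := by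
        intro h0
        have hpe : p = "" := String.toList_inj.mp (by simp [h0])
        rw [hpe] at hp
        exact hε hp
      obtain ⟨pc, pt, hpt⟩ := List.exists_cons_of_ne_nil hpnil
      have hjlt : j < line.toList.length := by
        by_contra hge
        have : line.toList.drop j = [] := List.drop_eq_nil_of_le (Nat.le_of_not_lt hge)
        rw [this, hpt] at hj
        exact absurd (List.prefix_nil.1 hj) (by simp)
      -- the line's character at j is p's first character
      have hdropj : line.toList.drop j = line.toList[j] :: line.toList.drop (j + 1) :=
        List.drop_eq_getElem_cons hjlt
      have hpc : pc = line.toList[j] := by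
        rw [hpt, hdropj] at hj
        exact (List.cons_prefix_cons.1 hj).1
      -- so p sits in the bucket probed at position j
      have hkey : PySem.Str.slice p (some 0) (some 1) = String.singleton line.toList[j] := by
        apply String.toList_inj.mp
        rw [dswKey_toList, hpt]
        simp [hpc]
      have hbucket : p ∈ (dswBuckets ps).getD (String.singleton line.toList[j]) [] := by
        rw [dswBuckets_getD]
        exact List.mem_filter.2 ⟨hp, by simp [hkey]⟩
      have hmem : ((j : Int), line.toList[j]) ∈ PySem.List.enumerate line.toList :=
        (mem_enumerate_iff _ _ _).2 ⟨j, rfl, List.getElem?_eq_getElem hjlt⟩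
      have hmatch : dswMatchAt line.toList ((j : Int)).toNat
          ((dswBuckets ps).getD (String.singleton line.toList[j]) []) = true :=
        (dswMatchAt_iff _ _ _).2 ⟨p, hbucket, by simpa using hj⟩
      have : dswLineScan line.toList (dswBuckets ps) (PySem.List.enumerate line.toList)
          = false :=
        (dswLineScan_eq_false_iff _ _ _).2 ⟨((j : Int), line.toList[j]), hmem, hmatch⟩
      rw [this] at hb
      exact Bool.false_ne_true hb

-- when "" is a phrase, A drops every line ("" is a substring of every line)
theorem dswFound_of_nil_mem (line : String) (ps : List String) (hε : "" ∈ ps) :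
    dswFound line ps = true :=
  (dswFound_iff _ _).2 ⟨"", hε, by simp⟩

theorem dsw_foldl_ext {α β : Type} (f g : α → β → α) (l : List β) (a : α)
    (h : ∀ acc x, f acc x = g acc x) : l.foldl f a = l.foldl g a := by
  induction l generalizing a with
  | nil => rfl
  | cons x xs ih => rw [List.foldl_cons, List.foldl_cons, h]; exact ih _

theorem dsw_fold_eq (ps content : List String) (out : List String) :
    content.foldl (fun out line => if dswFound line ps then out else out ++ [line]) out =
    content.foldl
      (fun out line =>
        if (dswBuckets ps).contains "" then out
        else if dswLineScan line.toList (dswBuckets ps) (PySem.List.enumerate line.toList)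
          then out ++ [line] else out)
      out := by
  apply dsw_foldl_ext
  intro acc line
  by_cases hε : "" ∈ ps
  · rw [(dswBuckets_contains_nil_iff ps).2 hε, dswFound_of_nil_mem line ps hε]
    simp
  · have hc : (dswBuckets ps).contains "" = false := by
      rcases h : (dswBuckets ps).contains "" with _ | _
      · rfl
      · exact absurd ((dswBuckets_contains_nil_iff ps).1 h) hε
    rw [hc, dswFound_eq_not_lineScan line ps hε]
    cases hb : dswLineScan line.toList (dswBuckets ps) (PySem.List.enumerate line.toList) <;>
      simp

-- ===== VERDICT (by name: the statement is the Claim_ definition above) =====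
theorem delete_starts_with_spec : Claim_equal_delete_starts_with := by
  intro content phrases _
  unfold Spec_delete_starts_with delete_starts_with delete_starts_with_alt
  exact dsw_fold_eq phrases content []
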